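-- pv_equiv track=rewrite | github.com/AmigoCap/PredicTrajec | ressource python/trajec.py | segmentation
-- ===== SOURCE A (Python) =====
-- def segmentation(stay_point_df, segment):
--     length = 0
--     for k in range(len(stay_point_df)):
--         if(stay_point_df[k][3] == segment):
--             length += 1
--
--     df = [[0]* 2 for _ in range(length)]
--     j=0
--     for i in range(len(stay_point_df)):
--         if(stay_point_df[i][3] == segment):
--             df[j][0] = stay_point_df[i][0]
--             df[j][1] = stay_point_df[i][1]
--             j+=1
--
--     return df
-- ===== SOURCE B (Python) =====
-- def segmentation(stay_point_df, segment):
--     # Single pass: build the result directly instead of counting first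
--     # and then filling a preallocated list.
--     return [[row[0], row[1]] for row in stay_point_df if row[3] == segment]
-- ===== Notes on version B (the rewrite author's own statement) =====
-- stated objective: simpler
-- what changed: A makes two passes (first counting matches, then index-filling a preallocated zero matrix with a running write cursor); B builds the result in one pass with a single list comprehension, with no preallocation or counter.
import Mathlib
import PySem

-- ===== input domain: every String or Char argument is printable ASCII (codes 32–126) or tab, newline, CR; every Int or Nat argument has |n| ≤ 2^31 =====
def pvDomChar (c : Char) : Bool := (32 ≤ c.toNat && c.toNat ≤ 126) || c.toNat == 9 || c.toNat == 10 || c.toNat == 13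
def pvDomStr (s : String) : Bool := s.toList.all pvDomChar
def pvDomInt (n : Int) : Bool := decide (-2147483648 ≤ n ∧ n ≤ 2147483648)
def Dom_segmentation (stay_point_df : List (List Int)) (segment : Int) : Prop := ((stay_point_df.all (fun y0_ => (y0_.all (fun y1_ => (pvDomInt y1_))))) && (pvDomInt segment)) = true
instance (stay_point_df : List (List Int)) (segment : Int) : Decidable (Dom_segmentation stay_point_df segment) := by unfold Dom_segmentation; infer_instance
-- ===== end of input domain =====

-- B replaces A's two passes (count, then index-fill a preallocated matrix) by one
-- single-pass comprehension; equivalence of the return value is proved on rows of length ≥ 4.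
-- ===== PORT A =====
def segmentation (stay_point_df : List (List Int)) (segment : Int) : List (List Int) :=
  -- first pass: count matching rows
  let length := stay_point_df.foldl
    (fun acc row => if PySem.List.pyGetD row 3 0 = segment then acc + 1 else acc) 0
  -- preallocate df = [[0]*2 for _ in range(length)]
  let df := List.replicate length ([0, 0] : List Int)
  -- second pass: fill df at running index j
  (stay_point_df.foldl
    (fun (st : List (List Int) × Nat) row =>
      if PySem.List.pyGetD row 3 0 = segment then
        (st.1.set st.2 [PySem.List.pyGetD row 0 0, PySem.List.pyGetD row 1 0], st.2 + 1)
      else st) (df, 0)).1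

-- ===== PORT B =====
def segmentation_alt (stay_point_df : List (List Int)) (segment : Int) : List (List Int) :=
  stay_point_df.filterMap
    (fun row => if PySem.List.pyGetD row 3 0 = segment then
        some [PySem.List.pyGetD row 0 0, PySem.List.pyGetD row 1 0]
      else none)

-- ===== PRECONDITION & SPEC =====
-- Pre_ excludes exactly the inputs where Python A raises IndexError: a row shorter than 4 fields.
def Pre_segmentation (stay_point_df : List (List Int)) (_segment : Int) : Prop :=
  ∀ row ∈ stay_point_df, 4 ≤ row.length
instance (stay_point_df : List (List Int)) (segment : Int) : Decidable (Pre_segmentation stay_point_df segment) := by unfold Pre_segmentation; infer_instance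
def pvWitness_segmentation : List (List Int) × Int := ([[1, 2, 0, 5], [3, 4, 0, 6]], 5)

def Spec_segmentation (stay_point_df : List (List Int)) (segment : Int) (out : List (List Int)) : Prop := out = segmentation_alt stay_point_df segment
instance (stay_point_df : List (List Int)) (segment : Int) (out : List (List Int)) : Decidable (Spec_segmentation stay_point_df segment out) := by unfold Spec_segmentation; infer_instance

-- ===== CLAIM (what is proved, stated in full; the proofs are below) =====
def Claim_equal_segmentation : Prop := ∀ (stay_point_df : List (List Int)) (segment : Int), Dom_segmentation stay_point_df segment → Pre_segmentation stay_point_df segment → Spec_segmentation stay_point_df segment (segmentation stay_point_df segment)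

-- ===== LEMMAS AND PROOFS =====

-- setting index pre.length of pre ++ x :: suf replaces x
theorem pv_set_append_length {α : Type} (pre : List α) (x : α) (suf : List α) (v : α) :
    (pre ++ x :: suf).set pre.length v = (pre ++ [v]) ++ suf := by
  induction pre with
  | nil => simp
  | cons h t ih => simp [ih]

-- loop invariant for A's second pass: with the write cursor at pre.length and exactly
-- enough preallocated slots left, the fold appends the filterMap of the remaining rows.
theorem pv_fill_inv (segment : Int) :
    ∀ (s : List (List Int)) (pre suf : List (List Int)),
      suf.length = (segmentation_alt s segment).length →
      (s.foldl
        (fun (st : List (List Int) × Nat) row =>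
          if PySem.List.pyGetD row 3 0 = segment then
            (st.1.set st.2 [PySem.List.pyGetD row 0 0, PySem.List.pyGetD row 1 0], st.2 + 1)
          else st) (pre ++ suf, pre.length)).1
        = pre ++ segmentation_alt s segment := by
  intro s
  induction s with
  | nil =>
    intro pre suf h
    simp only [segmentation_alt, List.filterMap_nil, List.length_nil] at h
    simp [segmentation_alt, List.length_eq_zero_iff.mp h]
  | cons r t ih =>
    intro pre suf h
    by_cases hc : PySem.List.pyGetD r 3 0 = segment
    · simp only [segmentation_alt, List.filterMap_cons, hc, if_pos] at h ⊢
      cases suf with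
      | nil => simp at h
      | cons x suf' =>
        simp only [List.foldl_cons, hc, if_pos]
        rw [pv_set_append_length]
        have := ih (pre ++ [[PySem.List.pyGetD r 0 0, PySem.List.pyGetD r 1 0]]) suf'
          (by simpa [segmentation_alt] using h)
        simp only [List.length_append, List.length_cons, List.length_nil] at this ⊢
        simpa [segmentation_alt, List.append_assoc] using this
    · simp only [segmentation_alt, List.filterMap_cons, hc, if_neg, List.foldl_cons,
        not_false_iff] at h ⊢
      exact ih pre suf (by simpa [segmentation_alt] using h)

-- A's first pass counts exactly the rows B keeps
theorem pv_count_eq (segment : Int) (s : List (List Int)) :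
    ∀ a : Nat, s.foldl
      (fun acc row => if PySem.List.pyGetD row 3 0 = segment then acc + 1 else acc) a
      = a + (segmentation_alt s segment).length := by
  induction s with
  | nil => intro a; simp [segmentation_alt]
  | cons r t ih =>
    intro a
    by_cases hc : PySem.List.pyGetD r 3 0 = segment
    · simp only [segmentation_alt, List.foldl_cons, List.filterMap_cons, hc, if_pos,
        List.length_cons] at ih ⊢
      rw [ih]; omega
    · simp only [segmentation_alt, List.foldl_cons, List.filterMap_cons, hc, if_neg,
        not_false_iff] at ih ⊢
      exact ih a

-- ===== VERDICT (by name: the statement is the Claim_ definition above) =====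
theorem segmentation_spec : Claim_equal_segmentation := by
  intro df segment _ _
  show segmentation df segment = segmentation_alt df segment
  unfold segmentation
  rw [show (df.foldl
      (fun acc row => if PySem.List.pyGetD row 3 0 = segment then acc + 1 else acc) 0)
      = (segmentation_alt df segment).length by simpa using pv_count_eq segment df 0]
  have := pv_fill_inv segment df [] (List.replicate (segmentation_alt df segment).length ([0,0] : List Int)) (by simp)
  simpa using this
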